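-- pv_equiv track=rewrite | github.com/tsuru7/algorithm-study | AtCoder/ABC/201-300/ABC278/D.py | solve
-- ===== SOURCE A (Python) =====
-- def solve(n,a,queries):
--     changed = dict()
--     for i in range(n):
--         changed[i+1] = a[i]
--     base = 0
--     ans=[]
--     for query in queries:
--         if query[0] == 1:
--             x = query[1]
--             base = x
--             changed.clear()
--         elif query[0] == 2:
--             i = query[1]
--             x = query[2]
--             if i in changed:
--                 changed[i] += x
--             else:
--                 changed[i] = x
--         else:
--             i = query[1]
--             if i in changed:
--                 ans.append(changed[i] + base)
--             else:
--                 ans.append(base)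
--     return ans
-- ===== SOURCE B (Python) =====
-- def solve(n, a, queries):
--     # per-get backward scan: answer each get by walking the earlier queries in
--     # reverse until the most recent assign-all (or the initial array), with no
--     # incremental dict/base state at all
--     ans = []
--     for j, q in enumerate(queries):
--         t = q[0]
--         if t != 1 and t != 2:
--             i = q[1]
--             acc = 0
--             for p in reversed(queries[:j]):
--                 if p[0] == 1:
--                     acc += p[1]
--                     break
--                 if p[0] == 2 and p[1] == i:
--                     acc += p[2]
--             else:
--                 acc += a[i - 1] if 1 <= i <= n else 0
--             ans.append(acc)
--     return ans
-- ===== Notes on version B (the rewrite author's own statement) =====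
-- stated objective: alternative
-- what changed: Drops A's incrementally maintained base value + delta dict entirely: B answers each get query independently by scanning the preceding queries backwards until the most recent assign-all (or the initial array), summing the matching point-adds on the way.
import Mathlib
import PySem

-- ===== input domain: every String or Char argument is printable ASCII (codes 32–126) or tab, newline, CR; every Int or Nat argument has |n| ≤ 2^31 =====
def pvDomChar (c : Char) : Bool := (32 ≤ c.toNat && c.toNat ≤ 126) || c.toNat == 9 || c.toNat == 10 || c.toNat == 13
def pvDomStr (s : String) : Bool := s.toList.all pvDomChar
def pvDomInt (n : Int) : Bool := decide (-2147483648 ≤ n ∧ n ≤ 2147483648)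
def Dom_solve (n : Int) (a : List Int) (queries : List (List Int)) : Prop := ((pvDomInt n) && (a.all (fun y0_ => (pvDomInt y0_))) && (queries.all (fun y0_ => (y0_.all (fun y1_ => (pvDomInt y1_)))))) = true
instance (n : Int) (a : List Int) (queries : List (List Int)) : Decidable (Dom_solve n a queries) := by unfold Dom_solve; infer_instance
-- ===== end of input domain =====

-- B drops A's incrementally maintained base+delta-dict state: each get query is
-- answered independently by a backward scan of the earlier queries (alternative
-- decomposition; equivalence of the returned list is proved below).

-- ===== PORT A =====
-- one query step of A: state is (changed, base, ans)
def stepA (st : PySem.Dict Int Int × Int × List Int) (query : List Int) :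
    PySem.Dict Int Int × Int × List Int :=
  let changed := st.1
  let base := st.2.1
  let ans := st.2.2
  if (PySem.List.pyGet? query 0).getD 0 = 1 then
    (PySem.Dict.empty, (PySem.List.pyGet? query 1).getD 0, ans)
  else if (PySem.List.pyGet? query 0).getD 0 = 2 then
    let i := (PySem.List.pyGet? query 1).getD 0
    let x := (PySem.List.pyGet? query 2).getD 0
    match changed.get? i with
    | some v => (changed.insert i (v + x), base, ans)
    | none   => (changed.insert i x, base, ans)
  else
    let i := (PySem.List.pyGet? query 1).getD 0
    match changed.get? i with
    | some v => (changed, base, ans ++ [v + base])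
    | none   => (changed, base, ans ++ [base])

def solve (n : Int) (a : List Int) (queries : List (List Int)) : List Int :=
  let changed0 := (PySem.List.pyRange 0 n 1).foldl
    (fun d i => d.insert (i + 1) ((PySem.List.pyGet? a i).getD 0)) PySem.Dict.empty
  (queries.foldl stepA (changed0, 0, ([] : List Int))).2.2

-- ===== PORT B =====
-- B's inner backward loop over the reversed prefix of earlier queries, with the
-- running accumulator acc; the [] case is Python's for-else (initial array value).
def backVal (n : Int) (a : List Int) (i : Int) (acc : Int) : List (List Int) → Int
  | [] => acc + (if 1 ≤ i ∧ i ≤ n then (PySem.List.pyGet? a (i - 1)).getD 0 else 0)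
  | p :: rest =>
    if (PySem.List.pyGet? p 0).getD 0 = 1 then acc + (PySem.List.pyGet? p 1).getD 0
    else if (PySem.List.pyGet? p 0).getD 0 = 2 ∧ (PySem.List.pyGet? p 1).getD 0 = i then
      backVal n a i (acc + (PySem.List.pyGet? p 2).getD 0) rest
    else backVal n a i acc rest

-- B's outer pass: state is (ans, seenRev) where seenRev is the reversed prefix
def solve_alt (n : Int) (a : List Int) (queries : List (List Int)) : List Int :=
  (queries.foldl (fun (st : List Int × List (List Int)) q =>
      let t := (PySem.List.pyGet? q 0).getD 0
      if t = 1 ∨ t = 2 then (st.1, q :: st.2)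
      else (st.1 ++ [backVal n a ((PySem.List.pyGet? q 1).getD 0) 0 st.2], q :: st.2))
    (([] : List Int), ([] : List (List Int)))).1

-- ===== PRECONDITION & SPEC =====
-- Pre_ excludes exactly the inputs on which Python A raises an IndexError:
-- n exceeding len(a) (the seeding loop), or a query shorter than its type's accesses.
def Pre_solve (n : Int) (a : List Int) (queries : List (List Int)) : Prop :=
  n ≤ (a.length : Int) ∧
  ∀ q ∈ queries, 2 ≤ q.length ∧ (q.headI = 2 → 3 ≤ q.length)
instance (n : Int) (a : List Int) (queries : List (List Int)) : Decidable (Pre_solve n a queries) := by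
  unfold Pre_solve; infer_instance

def pvWitness_solve : Int × List Int × List (List Int) :=
  (2, [5, 7], [[3, 1], [2, 1, 4], [1, 10], [3, 1], [3, 2]])

def Spec_solve (n : Int) (a : List Int) (queries : List (List Int)) (out : List Int) : Prop := out = solve_alt n a queries
instance (n : Int) (a : List Int) (queries : List (List Int)) (out : List Int) : Decidable (Spec_solve n a queries out) := by unfold Spec_solve; infer_instance

-- ===== CLAIM (what is proved, stated in full; the proofs are below) =====
def Claim_equal_solve : Prop := ∀ (n : Int) (a : List Int) (queries : List (List Int)), Dom_solve n a queries → Pre_solve n a queries → Spec_solve n a queries (solve n a queries)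

-- ===== LEMMAS AND PROOFS =====

-- the accumulator of backVal is a plain additive prefix
lemma backVal_acc (n : Int) (a : List Int) (i : Int) :
    ∀ (seen : List (List Int)) (acc : Int),
      backVal n a i acc seen = acc + backVal n a i 0 seen := by
  intro seen
  induction seen with
  | nil => intro acc; simp [backVal]
  | cons p rest ih =>
    intro acc
    by_cases h1 : (PySem.List.pyGet? p 0).getD 0 = 1
    · simp [backVal, h1]
    · by_cases h2 : (PySem.List.pyGet? p 0).getD 0 = 2 ∧ (PySem.List.pyGet? p 1).getD 0 = i
      · simp only [backVal, if_neg h1, if_pos h2]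
        rw [ih, ih (0 + (PySem.List.pyGet? p 2).getD 0)]
        omega
      · simp only [backVal, if_neg h1, if_neg h2]
        exact ih acc

-- A's current value of index i, read off its state
def valA (changed : PySem.Dict Int Int) (base i : Int) : Int :=
  match changed.get? i with
  | some v => v + base
  | none => base

-- seeding fold of A: the dict maps i ↦ f (i-1) exactly for i-1 ∈ L (values agree on overwrite)
lemma seed_get (f : Int → Int) :
    ∀ (L : List Int) (d : PySem.Dict Int Int) (i : Int),
      (L.foldl (fun d k => d.insert (k + 1) (f k)) d).get? i
        = if i - 1 ∈ L then some (f (i - 1)) else d.get? i := by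
  intro L
  induction L with
  | nil => intro d i; simp
  | cons x xs ih =>
    intro d i
    rw [List.foldl_cons, ih]
    by_cases hm : i - 1 ∈ xs
    · rw [if_pos hm, if_pos (List.mem_cons_of_mem _ hm)]
    · rw [if_neg hm, PySem.Dict.get?_insert]
      by_cases hx : i - 1 = x
      · rw [if_pos (by omega), if_pos (by simp [hx]), hx]
      · rw [if_neg (by omega), if_neg (by simp [hx, hm])]

-- main invariant: A's readable value of every index equals B's backward scan of the
-- reversed processed prefix, hence the two folds append the same answers
lemma main_fold (n : Int) (a : List Int) :
    ∀ (qs : List (List Int)) (changed : PySem.Dict Int Int) (base : Int)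
      (ans : List Int) (seen : List (List Int)),
      (∀ i, valA changed base i = backVal n a i 0 seen) →
      (qs.foldl stepA (changed, base, ans)).2.2 =
        (qs.foldl (fun (st : List Int × List (List Int)) q =>
            let t := (PySem.List.pyGet? q 0).getD 0
            if t = 1 ∨ t = 2 then (st.1, q :: st.2)
            else (st.1 ++ [backVal n a ((PySem.List.pyGet? q 1).getD 0) 0 st.2], q :: st.2))
          (ans, seen)).1 := by
  intro qs
  induction qs with
  | nil => intro changed base ans seen _; rfl
  | cons q qs ih =>
    intro changed base ans seen H
    simp only [List.foldl_cons]
    by_cases ht1 : (PySem.List.pyGet? q 0).getD 0 = 1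
    · rw [show stepA (changed, base, ans) q =
        (PySem.Dict.empty, (PySem.List.pyGet? q 1).getD 0, ans) by simp [stepA, ht1]]
      rw [if_pos (Or.inl ht1)]
      refine ih _ _ _ _ (fun i => ?_)
      rw [show backVal n a i 0 (q :: seen) = 0 + (PySem.List.pyGet? q 1).getD 0 by
        simp [backVal, ht1]]
      simp [valA, PySem.Dict.get?_empty]
    · by_cases ht2 : (PySem.List.pyGet? q 0).getD 0 = 2
      · set i0 := (PySem.List.pyGet? q 1).getD 0 with hi0
        set x0 := (PySem.List.pyGet? q 2).getD 0 with hx0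
        have hstepB : backVal n a i0 0 (q :: seen) = x0 + backVal n a i0 0 seen := by
          rw [show backVal n a i0 0 (q :: seen) = backVal n a i0 (0 + x0) seen by
            simp [backVal, ht2, ← hi0, ← hx0]]
          rw [backVal_acc]; omega
        have hother : ∀ i, i ≠ i0 → backVal n a i 0 (q :: seen) = backVal n a i 0 seen := by
          intro i hne
          conv_lhs => rw [backVal]
          rw [if_neg ht1, if_neg (fun h => hne h.2.symm)]
        rw [if_pos (Or.inr ht2)]
        cases hc : changed.get? i0 with
        | some v =>
          rw [show stepA (changed, base, ans) q =
            (changed.insert i0 (v + x0), base, ans) by simp [stepA, ht2, ← hi0, ← hx0, hc]]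
          refine ih _ _ _ _ (fun i => ?_)
          by_cases hi : i = i0
          · subst hi
            rw [hstepB, ← H i0]
            simp [valA, hc, PySem.Dict.get?_insert_self]
            omega
          · rw [hother i hi, ← H i]
            simp [valA, PySem.Dict.get?_insert_of_ne _ _ hi]
        | none =>
          rw [show stepA (changed, base, ans) q =
            (changed.insert i0 x0, base, ans) by simp [stepA, ht2, ← hi0, ← hx0, hc]]
          refine ih _ _ _ _ (fun i => ?_)
          by_cases hi : i = i0
          · subst hi
            rw [hstepB, ← H i0]
            simp [valA, hc, PySem.Dict.get?_insert_self]
          · rw [hother i hi, ← H i]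
            simp [valA, PySem.Dict.get?_insert_of_ne _ _ hi]
      · set i0 := (PySem.List.pyGet? q 1).getD 0 with hi0
        have hkeep : ∀ i, backVal n a i 0 (q :: seen) = backVal n a i 0 seen := by
          intro i
          conv_lhs => rw [backVal]
          rw [if_neg ht1, if_neg (fun h => ht2 h.1)]
        have happ : (match changed.get? i0 with
            | some v => ans ++ [v + base] | none => ans ++ [base])
            = ans ++ [backVal n a i0 0 seen] := by
          rw [← H i0]
          unfold valA
          cases changed.get? i0 <;> simp
        rw [show stepA (changed, base, ans) q =
          (changed, base, (match changed.get? i0 with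
            | some v => ans ++ [v + base] | none => ans ++ [base])) by
            unfold stepA
            simp only [ht1, ht2, ite_false, ← hi0]
            cases changed.get? i0 <;> simp [ht1, ht2]]
        rw [if_neg (fun h => h.elim ht1 ht2), happ]
        refine ih _ _ _ _ (fun i => ?_)
        rw [hkeep i]
        exact H i

-- ===== VERDICT (by name: the statement is the Claim_ definition above) =====
theorem solve_spec : Claim_equal_solve := by
  intro n a queries _ _
  unfold Spec_solve solve solve_alt
  refine main_fold n a queries _ 0 [] [] (fun i => ?_)
  unfold valA
  rw [seed_get (fun k => (PySem.List.pyGet? a k).getD 0) _ _ i, PySem.Dict.get?_empty]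
  simp only [PySem.List.mem_pyRange_one]
  rw [show backVal n a i 0 [] = 0 + (if 1 ≤ i ∧ i ≤ n then (PySem.List.pyGet? a (i - 1)).getD 0 else 0) from rfl]
  by_cases h : 0 ≤ i - 1 ∧ i - 1 < n
  · rw [if_pos h, if_pos (by omega)]; simp
  · rw [if_neg h, if_neg (by omega)]; simp
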